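-- pv_equiv track=rewrite | github.com/austral-prog/tp-7-Tommolomo | loops_and_print.py | enumerate_list
-- ===== SOURCE A (Python) =====
-- def enumerate_list(lista):
--     lista_enu = []
--     indice = 0
--     for string in lista:
--         if string:
--             lista_enu.append(f"{indice}. {string}")
--             indice = indice + 1
--     return lista_enu
-- ===== SOURCE B (Python) =====
-- def enumerate_list(lista):
--     # Back-to-front construction: first count the non-empty strings, then walk the
--     # list in reverse assigning descending indices, and reverse the result at the end.
--     total = sum(map(bool, lista))
--     out = []
--     idx = total
--     for s in reversed(lista):
--         if s:
--             idx -= 1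
--             out.append(f"{idx}. {s}")
--     out.reverse()
--     return out
-- ===== Notes on version B (the rewrite author's own statement) =====
-- stated objective: alternative
-- what changed: Instead of A's single forward pass with an ascending counter, B first counts the non-empty strings, then builds the output back-to-front by walking the list in reverse while assigning descending indices, and reverses the result at the end.
import Mathlib
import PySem

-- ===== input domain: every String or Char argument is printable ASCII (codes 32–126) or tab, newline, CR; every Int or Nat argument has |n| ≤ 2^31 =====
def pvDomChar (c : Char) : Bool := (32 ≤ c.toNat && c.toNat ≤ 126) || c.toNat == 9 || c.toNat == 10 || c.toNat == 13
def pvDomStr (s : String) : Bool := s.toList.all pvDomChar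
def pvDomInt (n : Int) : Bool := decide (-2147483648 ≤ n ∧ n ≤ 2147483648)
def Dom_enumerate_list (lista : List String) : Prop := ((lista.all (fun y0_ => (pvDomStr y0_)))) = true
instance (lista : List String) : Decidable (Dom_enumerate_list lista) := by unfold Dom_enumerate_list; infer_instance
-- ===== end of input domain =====

-- B replaces A's forward pass with ascending counter by a count prepass plus a reverse
-- walk assigning descending indices, building the output back-to-front (same cost).

-- ===== PORT A =====
-- Port of A: one forward pass with an explicit ascending counter, as in the Python loop.
def enumerate_list (lista : List String) : List String :=
  (lista.foldl (fun (st : List String × Int) string =>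
    if string ≠ "" then
      (st.1 ++ [PySem.Int.toStr st.2 ++ ". " ++ string], st.2 + 1)
    else st) ([], 0)).1

-- ===== PORT B =====
-- Port of B: total = sum(map(bool, lista)); reverse walk with descending idx; final reverse.
def enumerate_list_alt (lista : List String) : List String :=
  let total : Int := (lista.map (fun s => if s ≠ "" then (1 : Int) else 0)).sum
  let st := lista.reverse.foldl (fun (st : List String × Int) s =>
    if s ≠ "" then
      (st.1 ++ [PySem.Int.toStr (st.2 - 1) ++ ". " ++ s], st.2 - 1)
    else st) ([], total)
  st.1.reverse

-- ===== PRECONDITION & SPEC =====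
def Spec_enumerate_list (lista : List String) (out : List String) : Prop := out = enumerate_list_alt lista
instance (lista : List String) (out : List String) : Decidable (Spec_enumerate_list lista out) := by unfold Spec_enumerate_list; infer_instance

-- ===== CLAIM (what is proved, stated in full; the proofs are below) =====
def Claim_equal_enumerate_list : Prop := ∀ (lista : List String), Dom_enumerate_list lista → Spec_enumerate_list lista (enumerate_list lista)

-- ===== LEMMAS AND PROOFS =====

-- the formatted entry
def pvFmt (i : Int) (s : String) : String := PySem.Int.toStr i ++ ". " ++ s

-- forward enumeration with ascending counter (canonical form of A's loop)
def pvG : List String → Int → List String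
  | [], _ => []
  | x :: t, j => if x ≠ "" then pvFmt j x :: pvG t (j + 1) else pvG t j

-- reverse walk with descending counter (canonical form of B's loop)
def pvK : List String → Int → List String
  | [], _ => []
  | y :: t, j => if y ≠ "" then pvFmt (j - 1) y :: pvK t (j - 1) else pvK t j

-- count of non-empty strings, as an Int
def pvCnt (xs : List String) : Int := (xs.map (fun s => if s ≠ "" then (1 : Int) else 0)).sum

-- A's fold equals acc ++ pvG
theorem foldA_inv (xs : List String) (acc : List String) (i : Int) :
    (xs.foldl (fun (st : List String × Int) string =>
      if string ≠ "" then
        (st.1 ++ [PySem.Int.toStr st.2 ++ ". " ++ string], st.2 + 1)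
      else st) (acc, i)).1 = acc ++ pvG xs i := by
  induction xs generalizing acc i with
  | nil => simp [pvG]
  | cons x t ih =>
    by_cases hx : x = ""
    · simpa [pvG, hx] using ih acc i
    · simpa [pvG, hx, pvFmt] using ih (acc ++ [pvFmt i x]) (i + 1)

-- B's fold equals acc ++ pvK
theorem foldB_inv (ys : List String) (acc : List String) (j : Int) :
    (ys.foldl (fun (st : List String × Int) s =>
      if s ≠ "" then
        (st.1 ++ [PySem.Int.toStr (st.2 - 1) ++ ". " ++ s], st.2 - 1)
      else st) (acc, j)).1 = acc ++ pvK ys j := by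
  induction ys generalizing acc j with
  | nil => simp [pvK]
  | cons y t ih =>
    by_cases hy : y = ""
    · simpa [pvK, hy] using ih acc j
    · simpa [pvK, hy, pvFmt] using ih (acc ++ [pvFmt (j - 1) y]) (j - 1)

theorem pvG_append_singleton (t : List String) (x : String) (j : Int) :
    pvG (t ++ [x]) j = pvG t j ++ (if x ≠ "" then [pvFmt (j + pvCnt t) x] else []) := by
  induction t generalizing j with
  | nil => by_cases hx : x = "" <;> simp [pvG, pvCnt, hx]
  | cons y t ih =>
    by_cases hy : y = ""
    · subst hy
      simp [pvG, ih, pvCnt]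
    · have hc : (j + 1) + pvCnt t = j + pvCnt (y :: t) := by
        simp [pvCnt, hy]; ring
      simp [pvG, hy, ih, hc]

-- key: reverse walk starting at j + count, reversed, equals forward walk starting at j
theorem pvK_reverse (xs : List String) (j : Int) :
    (pvK xs.reverse (j + pvCnt xs)).reverse = pvG xs j := by
  induction xs using List.reverseRecOn generalizing j with
  | nil => simp [pvK, pvG, pvCnt]
  | append_singleton t x ih =>
    by_cases hx : x = ""
    · subst hx
      have hc : pvCnt (t ++ [""]) = pvCnt t := by simp [pvCnt]
      rw [List.reverse_append, hc]
      simp only [List.reverse_singleton, List.singleton_append, pvK]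
      simp [ih, pvG_append_singleton]
    · have hc : j + pvCnt (t ++ [x]) = (j + pvCnt t) + 1 := by
        simp [pvCnt, hx]; ring
      rw [List.reverse_append]
      simp only [List.reverse_singleton, List.singleton_append, hc, pvK]
      simp [ih, pvG_append_singleton, hx]

-- ===== VERDICT (by name: the statement is the Claim_ definition above) =====
theorem alt_eq_pvK (lista : List String) :
    enumerate_list_alt lista = (pvK lista.reverse (pvCnt lista)).reverse := by
  show ((lista.reverse.foldl (fun (st : List String × Int) s =>
    if s ≠ "" then
      (st.1 ++ [PySem.Int.toStr (st.2 - 1) ++ ". " ++ s], st.2 - 1)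
    else st) ([], (lista.map (fun s => if s ≠ "" then (1 : Int) else 0)).sum)).1).reverse = _
  rw [foldB_inv]
  simp [pvCnt]

theorem enumerate_list_spec : Claim_equal_enumerate_list := by
  intro lista _
  unfold Spec_enumerate_list enumerate_list
  rw [foldA_inv, alt_eq_pvK]
  have := pvK_reverse lista 0
  simp only [zero_add] at this
  simp [this]
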